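-- pv_equiv track=rewrite | github.com/TrentBrunson/Refresh | Set4/roseBowl.py | win_counter
-- ===== SOURCE A (Python) =====
-- def win_counter(roseWins):
--     winDict = {}
--     for i in range(len(roseWins)):
--         team = roseWins[i]
--         count = 0
--         for j in range(i, len(roseWins)):
--             if roseWins[j] == roseWins[i]:
--                 count += 1
--         winCount = {team:count}
--         if team not in winDict.keys():
--             winDict.update(winCount)
--     # find teams with 4 or more wins
--     win4 = {k:v for (k,v) in winDict.items() if v >= 4}
--     # make dictionary into list so it prints nicer
--     # sort by values then keys; need staged sort to reverse sort for the key column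
--     sortedWins = dict(sorted(win4.items(), reverse=True, key = lambda kv:(kv[1],kv[0])))
--     return team, sortedWins
-- ===== SOURCE B (Python) =====
-- def win_counter(roseWins):
--     # Sort-then-group: count each team by scanning runs of the sorted list,
--     # collect teams with >= 4 wins, then order by (count, team) descending
--     # via an ascending staged sort reversed (keys are distinct, so equal).
--     big = []
--     run, n = None, 0
--     for t in sorted(roseWins):
--         if t == run:
--             n += 1
--         else:
--             if n >= 4:
--                 big.append((run, n))
--             run, n = t, 1
--     if n >= 4:
--         big.append((run, n))
--     big = sorted(big, key=lambda kv: (kv[1], kv[0]))[::-1]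
--     return roseWins[-1], dict(big)
-- ===== Notes on version B (the rewrite author's own statement) =====
-- stated objective: faster
-- what changed: replaced A's O(n^2) dict-building with nested index rescans by sort-then-group run-length counting over the sorted list, with the final descending order obtained as the reverse of an ascending staged sort
import Mathlib
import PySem

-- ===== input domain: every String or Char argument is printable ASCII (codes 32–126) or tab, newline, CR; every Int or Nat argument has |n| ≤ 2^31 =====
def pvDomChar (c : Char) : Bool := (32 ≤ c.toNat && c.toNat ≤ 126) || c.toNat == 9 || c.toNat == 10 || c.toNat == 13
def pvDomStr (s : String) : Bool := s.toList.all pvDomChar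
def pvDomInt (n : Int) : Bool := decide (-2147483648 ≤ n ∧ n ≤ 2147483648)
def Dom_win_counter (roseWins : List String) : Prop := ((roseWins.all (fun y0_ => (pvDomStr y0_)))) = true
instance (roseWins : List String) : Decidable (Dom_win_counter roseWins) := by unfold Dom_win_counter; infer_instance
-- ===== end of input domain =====

-- B replaces A's O(n^2) nested index-rescan dict counting by sort-then-group run counting (objective: faster).
-- Both ports return the final Python `dict` as its items list.

-- ===== PORT A =====
def win_counter (roseWins : List String) : String × (List (String × Int)) :=
  -- for i in range(len(roseWins)): team = roseWins[i]; count = # of j in [i, n) with roseWins[j] == roseWins[i];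
  -- if team not in winDict: winDict[team] = count     (the loop also leaves `team` = last element)
  let st := (PySem.List.pyRange 0 (PySem.List.len roseWins)).foldl
    (fun (st : PySem.Dict String Int × Option String) i =>
      let team := PySem.List.pyGetD roseWins i ""
      let count := (PySem.List.pyRange i (PySem.List.len roseWins)).foldl
        (fun (c : Int) j => if PySem.List.pyGetD roseWins j "" == team then c + 1 else c) 0
      ((if st.1.contains team then st.1 else st.1.insert team count), some team))
    (PySem.Dict.empty, none)
  let win4 := st.1.items.filter (fun kv => kv.2 ≥ 4)
  let sortedWins := PySem.List.sorted2 win4 (fun kv => kv.2) (fun kv => kv.1) true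
  ((st.2).getD "", sortedWins)

-- ===== PORT B =====
def win_counter_alt (roseWins : List String) : String × (List (String × Int)) :=
  -- big = run-length groups of sorted(roseWins) with count >= 4;
  -- then big = sorted(big, key=(count, team))[::-1]; return roseWins[-1], dict(big)
  let srt := PySem.List.sorted roseWins (fun x => x) false
  let st := srt.foldl
    (fun (st : List (String × Int) × Option String × Int) t =>
      if some t == st.2.1 then (st.1, st.2.1, st.2.2 + 1)
      else ((if st.2.2 ≥ 4 then st.1 ++ [(st.2.1.getD "", st.2.2)] else st.1), some t, 1))
    ([], none, 0)
  let big := if st.2.2 ≥ 4 then st.1 ++ [(st.2.1.getD "", st.2.2)] else st.1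
  let big2 := (PySem.List.sorted2 big (fun kv => kv.2) (fun kv => kv.1) false).reverse
  ((PySem.List.pyGet? roseWins (-1)).getD "", big2)

-- ===== PRECONDITION & SPEC =====
-- Pre_ excludes only the empty list, on which A raises UnboundLocalError (`team` never bound) and B raises IndexError.
def Pre_win_counter (roseWins : List String) : Prop := roseWins ≠ []
instance (roseWins : List String) : Decidable (Pre_win_counter roseWins) := by unfold Pre_win_counter; infer_instance
def pvWitness_win_counter : List String := ["UCLA", "USC", "UCLA"]

def Spec_win_counter (roseWins : List String) (out : String × (List (String × Int))) : Prop := out = win_counter_alt roseWins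
instance (roseWins : List String) (out : String × (List (String × Int))) : Decidable (Spec_win_counter roseWins out) := by unfold Spec_win_counter; infer_instance

-- ===== CLAIM (what is proved, stated in full; the proofs are below) =====
def Claim_equal_win_counter : Prop := ∀ (roseWins : List String), Dom_win_counter roseWins → Pre_win_counter roseWins → Spec_win_counter roseWins (win_counter roseWins)

-- ===== LEMMAS AND PROOFS =====

-- the items A's dict ends up holding: each team at its first occurrence, with its total count
def pvSpecItems : List String → List (String × Int)
  | [] => []
  | x :: r => (x, ((x :: r).count x : Int)) :: (pvSpecItems r).filter (fun p => p.1 ≠ x)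

-- B's run-grouping loop, named: its step, its trailing flush, and what it produces from state (acc, some a, k)
def pvStep (st : List (String × Int) × Option String × Int) (t : String) :
    List (String × Int) × Option String × Int :=
  if some t == st.2.1 then (st.1, st.2.1, st.2.2 + 1)
  else ((if st.2.2 ≥ 4 then st.1 ++ [(st.2.1.getD "", st.2.2)] else st.1), some t, 1)

def pvFlush (st : List (String × Int) × Option String × Int) : List (String × Int) :=
  if st.2.2 ≥ 4 then st.1 ++ [(st.2.1.getD "", st.2.2)] else st.1

def pvGroups (a : String) (k : Int) : List String → List (String × Int)
  | [] => if k ≥ 4 then [(a, k)] else []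
  | x :: r => if x = a then pvGroups a (k + 1) r
              else (if k ≥ 4 then [(a, k)] else []) ++ pvGroups x 1 r

-- A's loop body, named (definitionally the lambda in win_counter)
def pvAStep (xs : List String) (st : PySem.Dict String Int × Option String) (i : Int) :
    PySem.Dict String Int × Option String :=
  let team := PySem.List.pyGetD xs i ""
  let count := (PySem.List.pyRange i (PySem.List.len xs)).foldl
    (fun (c : Int) j => if PySem.List.pyGetD xs j "" == team then c + 1 else c) 0
  ((if st.1.contains team then st.1 else st.1.insert team count), some team)

-- the lexicographic sort key (count, team) both final sorts use
def pvKey (kv : String × Int) : Lex (Int × String) := toLex (kv.2, kv.1)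

theorem pvSpecItems_mem (l : List String) (p : String × Int) :
    p ∈ pvSpecItems l ↔ p.1 ∈ l ∧ p.2 = (l.count p.1 : Int) := by
  induction l with
  | nil => simp [pvSpecItems]
  | cons x r ih =>
    simp only [pvSpecItems, List.mem_cons, List.mem_filter, ih, decide_eq_true_eq]
    constructor
    · rintro (rfl | ⟨⟨hm, hc⟩, hne⟩)
      · simp
      · refine ⟨Or.inr hm, ?_⟩
        have hb : ¬ (x = p.1) := fun h => hne h.symm
        simp [List.count_cons, hb, hc]
    · rintro ⟨hm, hc⟩
      by_cases hx : p.1 = x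
      · left
        have : p.2 = ((x :: r).count x : Int) := by rw [hc, hx]
        cases p with
        | mk a b => simp_all
      · right
        have hb : ¬ (x = p.1) := fun h => hx h.symm
        rcases hm with h | h
        · exact absurd h hx
        · refine ⟨⟨h, ?_⟩, hx⟩
          simpa [List.count_cons, hb] using hc

theorem pvSpecItems_nodup_keys (l : List String) : ((pvSpecItems l).map (·.1)).Nodup := by
  induction l with
  | nil => simp [pvSpecItems]
  | cons x r ih =>
    simp only [pvSpecItems, List.map_cons, List.nodup_cons]
    refine ⟨?_, ?_⟩
    · intro hmem
      rcases List.mem_map.mp hmem with ⟨p, hp, hpx⟩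
      have := (List.mem_filter.mp hp).2
      simp [hpx] at this
    · exact ih.sublist (List.filter_sublist.map _)

theorem pvSpecItems_filter (l : List String) (a : String) :
    pvSpecItems (l.filter (fun x => x ≠ a)) = (pvSpecItems l).filter (fun p => p.1 ≠ a) := by
  induction l with
  | nil => simp [pvSpecItems]
  | cons y r ih =>
    simp only [ne_eq, decide_not] at ih ⊢
    by_cases hy : y = a
    · subst hy
      rw [List.filter_cons]
      simp only [decide_true, Bool.not_true, Bool.false_eq_true, if_false, ih, pvSpecItems]
      rw [List.filter_cons]
      simp only [decide_true, Bool.not_true, Bool.false_eq_true, if_false, List.filter_filter]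
      exact (List.filter_congr (fun p _ => by cases h : decide (p.1 = y) <;> simp [h])).symm
    · have hyb : (decide (y = a)) = false := by simp [hy]
      rw [List.filter_cons]
      simp only [hyb, Bool.not_false, if_true]
      simp only [pvSpecItems, ih]
      have hcnt : (r.filter (fun x => !decide (x = a))).count y = r.count y := by
        rw [List.count_filter]
        simp [hy]
      rw [List.filter_cons]
      simp only [List.count_cons_self, hcnt, hyb, Bool.not_false, if_true, List.filter_filter]
      congr 1
      exact List.filter_congr (fun p _ => Bool.and_comm _ _)

theorem pvSpec_perm {l l' : List String} (h : l.Perm l') :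
    (pvSpecItems l).Perm (pvSpecItems l') := by
  rw [List.perm_ext_iff_of_nodup ((pvSpecItems_nodup_keys l).of_map)
    ((pvSpecItems_nodup_keys l').of_map)]
  intro p
  simp only [pvSpecItems_mem, h.mem_iff, h.count_eq]

theorem pvRunFold (l : List String) : ∀ (a : String) (k : Int) (acc : List (String × Int)),
    pvFlush (l.foldl pvStep (acc, some a, k)) = acc ++ pvGroups a k l := by
  induction l with
  | nil =>
    intro a k acc
    by_cases hk : k ≥ 4 <;> simp [pvFlush, pvGroups, hk]
  | cons x r ih =>
    intro a k acc
    rw [List.foldl_cons]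
    by_cases hx : x = a
    · subst hx
      have hstep : pvStep (acc, some x, k) x = (acc, some x, k + 1) := by
        simp [pvStep]
      rw [hstep, ih]
      simp [pvGroups]
    · have hstep : pvStep (acc, some a, k) x
          = ((if k ≥ 4 then acc ++ [(a, k)] else acc), some x, 1) := by
        simp [pvStep, hx]
      rw [hstep, ih]
      by_cases hk : k ≥ 4 <;> simp [pvGroups, hx, hk]

theorem pvGroups_eq (l : List String) : ∀ (a : String) (k : Int),
    (a :: l).Pairwise (· ≤ ·) →
    pvGroups a k l
      = ((a, k + (l.count a : Int)) :: pvSpecItems (l.filter (fun x => x ≠ a))).filter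
          (fun p => p.2 ≥ 4) := by
  induction l with
  | nil =>
    intro a k _
    by_cases hk : k ≥ 4 <;> simp [pvGroups, pvSpecItems, hk]
  | cons x r ih =>
    intro a k h
    rcases List.pairwise_cons.mp h with ⟨ha, hxr⟩
    by_cases hx : x = a
    · subst hx
      have lhs : pvGroups x k (x :: r) = pvGroups x (k + 1) r := by
        simp [pvGroups]
      rw [lhs, ih x (k + 1) hxr]
      have hval : k + 1 + (r.count x : Int) = k + ((x :: r).count x : Int) := by
        simp only [List.count_cons_self]
        push_cast
        ring
      rw [hval]
      have hft : (x :: r).filter (fun y => y ≠ x) = r.filter (fun y => y ≠ x) := by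
        rw [List.filter_cons]
        simp
      rw [hft]
    · have hax : a < x := lt_of_le_of_ne (ha x List.mem_cons_self) (fun h' => hx h'.symm)
      have hnr : a ∉ (x :: r) := by
        intro hmem
        rcases List.mem_cons.mp hmem with h' | h'
        · exact hx h'.symm
        · exact absurd ((List.pairwise_cons.mp hxr).1 a h') (not_le_of_gt hax)
      have hcnt0 : (x :: r).count a = 0 := List.count_eq_zero.mpr hnr
      have hfe : (x :: r).filter (fun y => y ≠ a) = x :: r :=
        List.filter_eq_self.mpr (fun y hy => by
          simp only [ne_eq, decide_not, Bool.not_eq_true', decide_eq_false_iff_not]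
          intro hya
          subst hya
          exact hnr hy)
      have lhs : pvGroups a k (x :: r)
          = (if k ≥ 4 then [(a, k)] else []) ++ pvGroups x 1 r := by
        simp [pvGroups, hx]
      rw [lhs, ih x 1 hxr, hfe, hcnt0, pvSpecItems_filter]
      simp only [Nat.cast_zero, add_zero, pvSpecItems]
      have hv : (1 : Int) + (r.count x : Int) = ((x :: r).count x : Int) := by
        simp only [List.count_cons_self]
        push_cast
        ring
      rw [hv]
      conv_rhs => rw [List.filter_cons]
      by_cases hk : k ≥ 4 <;> simp [hk]

theorem pvKey_injective : Function.Injective pvKey := by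
  intro p q h
  have := congrArg (fun z => ofLex z) h
  simp only [pvKey, ofLex_toLex] at this
  cases p; cases q
  simp_all [Prod.ext_iff]

theorem pvSorted2_lex (xs : List (String × Int)) (rev : Bool) :
    PySem.List.sorted2 xs (fun kv => kv.2) (fun kv => kv.1) rev
      = PySem.List.sorted xs pvKey rev := by
  have hbe : (fun (a b : String × Int) =>
        decide (a.2 < b.2) || (!decide (b.2 < a.2) && decide (a.1 < b.1)))
      = (fun (a b : String × Int) => decide (pvKey a < pvKey b)) := by
    funext a b
    have hlex : (pvKey a < pvKey b) ↔ (a.2 < b.2 ∨ (a.2 = b.2 ∧ a.1 < b.1)) := by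
      unfold pvKey
      rw [Prod.Lex.lt_iff]
      simp
    rcases lt_trichotomy a.2 b.2 with h | h | h
    · simp [h, hlex, le_of_lt h, not_lt_of_gt h]
    · simp [h, hlex, lt_irrefl]
    · simp [hlex, not_lt_of_gt h, h, ne_of_gt h, lt_asymm h]
  unfold PySem.List.sorted2 PySem.List.sorted
  rw [hbe]

-- Python roseWins[-1] is the last element
theorem pvGetLast (xs : List String) (h : xs ≠ []) :
    PySem.List.pyGet? xs (-1) = some (xs.getLast h) := by
  have h1 : 0 < xs.length := List.length_pos_iff.mpr h
  simp only [PySem.List.pyGet?, PySem.List.pyIdx?]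
  rw [if_neg (by omega), if_pos (by push_cast; omega)]
  have hg : xs[xs.length - 1]? = some (xs.getLast h) := by
    rw [← List.getLast?_eq_getElem?]
    exact List.getLast?_eq_some_getLast h
  simpa using hg

theorem pv_foldl_prod_split {α β γ : Type} (l : List α) (body : β × Option γ → α → β × Option γ)
    (f : β → α → β) (g : α → γ) (hb : ∀ st x, body st x = (f st.1 x, some (g x)))
    (d : β) (t : Option γ) :
    l.foldl body (d, t) = (l.foldl f d, (l.getLast?.map g).or t) := by
  induction l generalizing d t with
  | nil => simp
  | cons x r ih =>
      simp only [List.foldl_cons, hb]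
      rw [ih]
      cases hr : r.getLast? with
      | none => simp_all [List.getLast?_eq_none_iff.mp hr]
      | some y =>
          have : (x :: r).getLast? = some y := by
            cases r with
            | nil => simp at hr
            | cons a s => rw [List.getLast?_cons_cons]; exact hr
          simp [this]

theorem pvA_items (xs : List String) (suf : List String) : ∀ (i : ℕ) (d : PySem.Dict String Int),
    xs.drop i = suf →
    ((PySem.List.pyRange (i : Int) (PySem.List.len xs)).foldl
      (fun d i =>
        let team := PySem.List.pyGetD xs i ""
        let count := (PySem.List.pyRange i (PySem.List.len xs)).foldl
          (fun (c : Int) j => if PySem.List.pyGetD xs j "" == team then c + 1 else c) 0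
        if d.contains team then d else d.insert team count) d).items
      = d.items ++ (pvSpecItems suf).filter (fun p => !d.contains p.1) := by
  induction suf with
  | nil =>
    intro i d hdrop
    have hlen : xs.length ≤ i := List.drop_eq_nil_iff.mp hdrop
    rw [PySem.List.pyRange_one_eq_nil (by simp; exact_mod_cast hlen)]
    simp [pvSpecItems]
  | cons x rest ih =>
    intro i d hdrop
    have hi : i < xs.length := by
      by_contra h
      rw [List.drop_eq_nil_iff.mpr (by omega)] at hdrop
      simp at hdrop
    have hx : xs.getD i "" = x := by
      have h0 : (xs.drop i)[0]? = some x := by rw [hdrop]; rfl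
      rw [List.getElem?_drop] at h0
      simp only [Nat.add_zero] at h0
      simp [List.getD, h0]
    rw [PySem.List.pyRange_one_cons (by simp; exact_mod_cast hi)]
    rw [List.foldl_cons]
    simp only [PySem.List.pyGetD_natCast, hx]
    have hcnt : (PySem.List.pyRange (i : Int) (PySem.List.len xs)).foldl
        (fun (c : Int) j => if PySem.List.pyGetD xs j "" == x then c + 1 else c) 0
        = ((x :: rest).count x : Int) := by
      rw [PySem.List.foldl_pyRange_pyGetD xs "" (fun c y => if y == x then c + 1 else c) 0 (by positivity)]
      rw [PySem.List.foldl_count_if (fun y => y == x)]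
      simp [Int.toNat_natCast, hdrop, List.count]
    rw [hcnt]
    have hdrop' : xs.drop (i + 1) = rest := by
      rw [← List.tail_drop, hdrop]; rfl
    have hcast : ((i : Int) + 1) = ((i + 1 : ℕ) : Int) := by push_cast; ring
    rw [hcast]
    by_cases hc : d.contains x = true
    · rw [if_pos hc, ih (i + 1) d hdrop']
      congr 1
      simp only [pvSpecItems, List.filter_cons, hc, Bool.not_true, Bool.false_eq_true, if_false,
        List.filter_filter]
      apply List.filter_congr
      intro p _
      cases hpc : d.contains p.1 <;> by_cases hpx : p.1 = x <;> simp_all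
    · have hc' : d.contains x = false := by simpa using hc
      rw [if_neg hc, ih (i + 1) _ hdrop',
        PySem.Dict.items_insert_of_not_contains _ _ hc', List.append_assoc]
      congr 1
      simp only [pvSpecItems, List.filter_cons, hc', Bool.not_false, if_pos,
        List.singleton_append]
      congr 1
      simp only [PySem.Dict.contains_insert, List.filter_filter]
      apply List.filter_congr
      intro p _
      cases hpc : d.contains p.1 <;> by_cases hpx : p.1 = x <;> simp_all

-- ===== VERDICT (by name: the statement is the Claim_ definition above) =====
theorem win_counter_spec : Claim_equal_win_counter := by
  intro xs hdom hpre
  have hne : xs ≠ [] := hpre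
  have hlen1 : 0 < xs.length := List.length_pos_iff.mpr hne
  unfold Spec_win_counter
  have hAval : win_counter xs
      = ((((PySem.List.pyRange 0 (PySem.List.len xs)).foldl (pvAStep xs)
            (PySem.Dict.empty, none)).2).getD "",
         PySem.List.sorted2
           ((((PySem.List.pyRange 0 (PySem.List.len xs)).foldl (pvAStep xs)
             (PySem.Dict.empty, none)).1).items.filter (fun kv => kv.2 ≥ 4))
           (fun kv => kv.2) (fun kv => kv.1) true) := rfl
  have hBval : win_counter_alt xs
      = ((PySem.List.pyGet? xs (-1)).getD "",
         (PySem.List.sorted2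
           (pvFlush ((PySem.List.sorted xs (fun x => x) false).foldl pvStep ([], none, 0)))
           (fun kv => kv.2) (fun kv => kv.1) false).reverse) := rfl
  rw [hAval, hBval]
  have hsplit := pv_foldl_prod_split (β := PySem.Dict String Int) (γ := String)
      (PySem.List.pyRange 0 (PySem.List.len xs)) (pvAStep xs)
      (fun d i =>
        let team := PySem.List.pyGetD xs i ""
        let count := (PySem.List.pyRange i (PySem.List.len xs)).foldl
          (fun (c : Int) j => if PySem.List.pyGetD xs j "" == team then c + 1 else c) 0
        if d.contains team then d else d.insert team count)
      (fun i => PySem.List.pyGetD xs i "") (fun _ _ => rfl) PySem.Dict.empty none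
  rw [hsplit]
  have hitemsA : ((PySem.List.pyRange ((0 : ℕ) : Int) (PySem.List.len xs)).foldl
      (fun d i =>
        let team := PySem.List.pyGetD xs i ""
        let count := (PySem.List.pyRange i (PySem.List.len xs)).foldl
          (fun (c : Int) j => if PySem.List.pyGetD xs j "" == team then c + 1 else c) 0
        if d.contains team then d else d.insert team count) PySem.Dict.empty).items
      = pvSpecItems xs := by
    rw [pvA_items xs xs 0 PySem.Dict.empty (by simp)]
    have he : PySem.Dict.empty.items = ([] : List (String × Int)) := rfl
    simp [PySem.Dict.contains_empty, he]
  simp only [Nat.cast_zero] at hitemsA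
  -- last loop value on A's side
  have hlastA : (PySem.List.pyRange 0 (PySem.List.len xs)).getLast?
      = some ((xs.length : Int) - 1) := by
    have e : PySem.List.pyRange 0 (PySem.List.len xs)
        = PySem.List.pyRange 0 (((xs.length : Int) - 1) + 1) := by
      simp
    rw [e, PySem.List.pyRange_one_succ_right (by omega), List.getLast?_concat]
  have hgetA : PySem.List.pyGetD xs ((xs.length : Int) - 1) "" = xs.getLast hne := by
    have hcast : ((xs.length : Int) - 1) = ((xs.length - 1 : ℕ) : Int) := by
      push_cast [hlen1]
      ring
    rw [hcast, PySem.List.pyGetD_natCast]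
    have hlt : xs.length - 1 < xs.length := by omega
    rw [List.getD_eq_getElem?_getD, List.getElem?_eq_getElem hlt]
    simp [List.getLast_eq_getElem]
  -- B side: run grouping of the sorted copy
  have hsrtne : PySem.List.sorted xs (fun x => x) false ≠ [] := by
    rw [ne_eq, PySem.List.sorted_eq_nil_iff]
    exact hne
  obtain ⟨y, rest, heq⟩ := List.exists_cons_of_ne_nil hsrtne
  have hsp : (PySem.List.sorted xs (fun x => x) false).Perm xs :=
    PySem.List.sorted_perm xs (fun x => x) false
  have hsorted : (PySem.List.sorted xs (fun x => x) false).Pairwise (· ≤ ·) := by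
    simpa using PySem.List.sorted_pairwise xs (fun x => x)
  have hbig : pvFlush ((PySem.List.sorted xs (fun x => x) false).foldl pvStep ([], none, 0))
      = (pvSpecItems (PySem.List.sorted xs (fun x => x) false)).filter (fun p => p.2 ≥ 4) := by
    rw [heq, List.foldl_cons]
    have hstep0 : pvStep ([], none, 0) y = ([], some y, 1) := by
      simp [pvStep]
    rw [hstep0, pvRunFold rest y 1 []]
    have hsy : (y :: rest).Pairwise (· ≤ ·) := heq ▸ hsorted
    rw [pvGroups_eq rest y 1 hsy, pvSpecItems_filter]
    simp only [pvSpecItems, List.nil_append]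
    have hv : (1 : Int) + (rest.count y : Int) = ((y :: rest).count y : Int) := by
      simp only [List.count_cons_self]
      push_cast
      ring
    rw [hv]
  -- the two filtered item lists are permutations with all-distinct sort keys
  have hper : ((pvSpecItems (PySem.List.sorted xs (fun x => x) false)).filter
      (fun p => p.2 ≥ 4)).Perm ((pvSpecItems xs).filter (fun p => p.2 ≥ 4)) :=
    (pvSpec_perm hsp).filter _
  have hnodupA : ((pvSpecItems xs).filter (fun p => p.2 ≥ 4)).Nodup :=
    ((pvSpecItems_nodup_keys xs).of_map).filter _
  have hmapA : (((pvSpecItems xs).filter (fun p => p.2 ≥ 4)).map pvKey).Nodup :=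
    hnodupA.map pvKey_injective
  have hysperm : (PySem.List.sorted ((pvSpecItems xs).filter (fun p => p.2 ≥ 4)) pvKey true).Perm
      ((pvSpecItems xs).filter (fun p => p.2 ≥ 4)) :=
    PySem.List.sorted_perm _ pvKey true
  have hle := PySem.List.sorted_pairwise_rev ((pvSpecItems xs).filter (fun p => p.2 ≥ 4)) pvKey
  have hysmap : ((PySem.List.sorted ((pvSpecItems xs).filter (fun p => p.2 ≥ 4)) pvKey true).map
      pvKey).Nodup := ((hysperm.map pvKey).nodup_iff).mpr hmapA
  have hne' : (PySem.List.sorted ((pvSpecItems xs).filter (fun p => p.2 ≥ 4)) pvKey true).Pairwise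
      (fun a b => pvKey a ≠ pvKey b) := List.pairwise_map.mp hysmap
  have hlt : (PySem.List.sorted ((pvSpecItems xs).filter (fun p => p.2 ≥ 4)) pvKey true).Pairwise
      (fun a b => pvKey b < pvKey a) :=
    (hle.and hne').imp (fun h => lt_of_le_of_ne h.1 h.2.symm)
  have hBsort : PySem.List.sorted ((pvSpecItems (PySem.List.sorted xs (fun x => x) false)).filter
        (fun p => p.2 ≥ 4)) pvKey false
      = (PySem.List.sorted ((pvSpecItems xs).filter (fun p => p.2 ≥ 4)) pvKey true).reverse := by
    apply PySem.List.sorted_eq_of_perm_of_pairwise_lt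
    · exact ((List.reverse_perm _).trans hysperm).trans hper.symm
    · exact List.pairwise_reverse.mpr hlt
  rw [hitemsA, hlastA, pvGetLast xs hne, hbig, pvSorted2_lex, pvSorted2_lex, hBsort,
    List.reverse_reverse]
  simp [hgetA]
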